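-- pv_equiv track=rewrite | github.com/Christopher-Cannon/python-docs | Example code/extra/hard/total_letters.py | find_total_letters
-- ===== SOURCE A (Python) =====
-- def find_total_letters(string):
--     alphabet = "abcdefghijklmnopqrstuvwxyz"
--     letter_count = 0
--
--     for str_char in string:
--         for alpha_letter in alphabet:
--             if(str_char == alpha_letter):
--                 letter_count += 1
--             else:
--                 pass
--
--     return letter_count
-- ===== SOURCE B (Python) =====
-- def find_total_letters(string):
--     counts = {}
--     for ch in string:
--         counts[ch] = counts.get(ch, 0) + 1
--     return sum(counts.get(ch, 0) for ch in "abcdefghijklmnopqrstuvwxyz")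
-- ===== Notes on version B (the rewrite author's own statement) =====
-- stated objective: faster
-- what changed: B builds a character frequency table in one pass over the string and then sums the 26 table entries for a-z, instead of A's nested loop scanning the whole 26-letter alphabet for every character of the string.
import Mathlib
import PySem

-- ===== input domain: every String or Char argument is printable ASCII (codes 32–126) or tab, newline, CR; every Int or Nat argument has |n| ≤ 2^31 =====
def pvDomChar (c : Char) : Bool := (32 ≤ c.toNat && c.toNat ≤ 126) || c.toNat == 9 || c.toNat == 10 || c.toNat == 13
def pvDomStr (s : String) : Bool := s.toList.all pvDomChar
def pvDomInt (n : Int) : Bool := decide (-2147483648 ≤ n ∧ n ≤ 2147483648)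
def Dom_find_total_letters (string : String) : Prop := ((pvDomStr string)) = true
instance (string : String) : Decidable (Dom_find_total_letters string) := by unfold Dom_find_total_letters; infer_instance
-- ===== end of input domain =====

-- B replaces A's nested alphabet scan per character by a one-pass frequency table
-- plus a 26-entry readout; same result, more idiomatic.

-- ===== PORT A =====
def find_total_letters (string : String) : Int :=
  string.toList.foldl
    (fun letter_count str_char =>
      "abcdefghijklmnopqrstuvwxyz".toList.foldl
        (fun lc alpha_letter => if str_char = alpha_letter then lc + 1 else lc)
        letter_count)
    0

-- ===== PORT B =====
def find_total_letters_alt (string : String) : Int :=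
  let counts : PySem.Dict Char Int :=
    string.toList.foldl (fun d ch => d.insert ch (d.getD ch 0 + 1)) PySem.Dict.empty
  "abcdefghijklmnopqrstuvwxyz".toList.foldl (fun s ch => s + counts.getD ch 0) 0

-- ===== PRECONDITION & SPEC =====
def Spec_find_total_letters (string : String) (out : Int) : Prop := out = find_total_letters_alt string
instance (string : String) (out : Int) : Decidable (Spec_find_total_letters string out) := by unfold Spec_find_total_letters; infer_instance

-- ===== CLAIM (what is proved, stated in full; the proofs are below) =====
def Claim_equal_find_total_letters : Prop := ∀ (string : String), Dom_find_total_letters string → Spec_find_total_letters string (find_total_letters string)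

-- ===== LEMMAS AND PROOFS =====

-- A's inner loop: scanning list l for matches with c adds l.count c
theorem inner_fold_count (c : Char) (l : List Char) (acc : Int) :
    l.foldl (fun lc a => if c = a then lc + 1 else lc) acc = acc + (l.count c : Int) := by
  induction l generalizing acc with
  | nil => simp
  | cons h t ih =>
      simp only [List.foldl_cons, List.count_cons, ih]
      by_cases hc : c = h
      · simp [hc]; omega
      · simp [hc, Ne.symm hc]

-- generic accumulate-a-sum loop
theorem foldl_add_sum (f : Char → Int) (l : List Char) (acc : Int) :
    l.foldl (fun s x => s + f x) acc = acc + (l.map f).sum := by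
  induction l generalizing acc with
  | nil => simp
  | cons h t ih => simp only [List.foldl_cons, List.map_cons, List.sum_cons, ih]; ring

-- consing a character onto the string adds its alphabet-count to the readout sum
theorem sum_count_cons (h : Char) (t alpha : List Char) :
    (alpha.map (fun ch => ((h :: t).count ch : Int))).sum
      = (alpha.map (fun ch => (t.count ch : Int))).sum + (alpha.count h : Int) := by
  induction alpha with
  | nil => simp
  | cons a b ihb =>
      simp only [List.map_cons, List.sum_cons, ihb]
      have h1 : (((h :: t).count a : Nat) : Int) = (t.count a : Int) + (if a = h then 1 else 0) := by
        by_cases hc : a = h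
        · simp [hc]
        · simp [List.count_cons, hc]
          exact fun h' => hc h'.symm
      have h2 : (((a :: b).count h : Nat) : Int) = (b.count h : Int) + (if h = a then 1 else 0) := by
        by_cases hc : h = a
        · simp [hc]
        · simp [List.count_cons, hc]
          exact fun h' => hc h'.symm
      rw [h1, h2]
      by_cases hc : a = h
      · simp [hc]; omega
      · simp [hc, Ne.symm hc]; omega

-- double counting: summing alphabet-counts over xs = summing xs-counts over the alphabet
theorem sum_count_swap (xs alpha : List Char) :
    ((xs.map (fun c => (alpha.count c : Int))).sum)
      = ((alpha.map (fun ch => (xs.count ch : Int))).sum) := by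
  induction xs with
  | nil => simp
  | cons h t ih => simp only [List.map_cons, List.sum_cons, ih, sum_count_cons]; ring

-- ===== VERDICT (by name: the statement is the Claim_ definition above) =====
theorem find_total_letters_spec : Claim_equal_find_total_letters := by
  intro s _
  show find_total_letters s = find_total_letters_alt s
  unfold find_total_letters find_total_letters_alt
  simp only [PySem.Dict.foldl_insert_getD_add_one_eq_counter, PySem.Dict.getD_counter,
    inner_fold_count, foldl_add_sum, sum_count_swap, zero_add]
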